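-- pv_equiv track=rewrite | github.com/AlexandreFenyo/awsgpu | src/pipeline-advanced/process_chunks_add_title.py | _deepest_heading_text
-- ===== SOURCE A (Python) =====
-- from typing import Any, Dict, Optional
--
-- def _deepest_heading_text(headings: Any) -> Optional[str]:
--     """
--     Given a headings mapping like {"h1": "...", "h3": "...", ...},
--     return the text for the deepest heading (largest numeric suffix).
--     If no valid heading is found, return None.
--     """
--     if not isinstance(headings, dict):
--         return None
--
--     best_level = -1
--     best_text: Optional[str] = None
--
--     for key, value in headings.items():
--         if not isinstance(key, str):
--             continue
--         if not key.startswith("h"):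
--             continue
--         try:
--             level = int(key[1:])
--         except (ValueError, TypeError):
--             continue
--         if 1 <= level <= 6 and isinstance(value, str) and value.strip():
--             if level > best_level:
--                 best_level = level
--                 best_text = value.strip()
--
--     return best_text
-- ===== SOURCE B (Python) =====
-- from typing import Any, Dict, Optional
--
-- def _level_of(key: Any) -> Optional[int]:
--     """Return the heading level 1..6 for a key like 'h3', else None."""
--     if not isinstance(key, str) or not key.startswith("h"):
--         return None
--     try:
--         level = int(key[1:])
--     except (ValueError, TypeError):
--         return None
--     return level if 1 <= level <= 6 else None
--
-- def _deepest_heading_text(headings: Any) -> Optional[str]: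
--     if not isinstance(headings, dict):
--         return None
--     # first stripped text seen for each level
--     first: Dict[int, str] = {}
--     for key, value in headings.items():
--         level = _level_of(key)
--         if level is not None and isinstance(value, str) and value.strip():
--             first.setdefault(level, value.strip())
--     for level in (6, 5, 4, 3, 2, 1):
--         if level in first:
--             return first[level]
--     return None
-- ===== Notes on version B (the rewrite author's own statement) =====
-- stated objective: alternative
-- what changed: Replaces the running best-level/best-text accumulator with a first-occurrence-per-level table built in one pass plus a descending probe over levels 6..1; the strict-greater tie-break of A becomes setdefault's keep-first rule.
import Mathlib
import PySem

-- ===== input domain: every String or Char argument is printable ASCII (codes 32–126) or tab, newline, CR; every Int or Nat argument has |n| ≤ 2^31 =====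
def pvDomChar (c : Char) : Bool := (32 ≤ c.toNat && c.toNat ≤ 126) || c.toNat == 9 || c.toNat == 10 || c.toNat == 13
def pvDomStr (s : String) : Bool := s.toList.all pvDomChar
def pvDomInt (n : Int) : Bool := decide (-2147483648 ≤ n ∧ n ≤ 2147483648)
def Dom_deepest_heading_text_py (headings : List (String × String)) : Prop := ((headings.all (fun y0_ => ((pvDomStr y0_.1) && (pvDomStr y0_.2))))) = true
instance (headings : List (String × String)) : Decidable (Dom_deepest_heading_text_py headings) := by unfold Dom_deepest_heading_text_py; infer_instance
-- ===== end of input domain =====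

-- B replaces A's running best-level/best-text accumulator by a first-text-per-level table plus a descending probe over levels 6..1 (alternative decomposition, same cost).


-- ===== PORT A =====
def pvAStep (st : Int × Option String) (kv : String × String) : Int × Option String :=
  if PySem.Str.startswith kv.1 "h" then
    match PySem.Int.ofStr? (PySem.Str.slice kv.1 (some 1) none) with
    | none => st
    | some level =>
      if 1 ≤ level ∧ level ≤ 6 ∧ PySem.Str.strip kv.2 ≠ "" then
        if st.1 < level then (level, some (PySem.Str.strip kv.2)) else st
      else st
  else st

def deepest_heading_text_py (headings : List (String × String)) : Option String :=
  (headings.foldl pvAStep (-1, none)).2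

-- ===== PORT B =====
-- helper _level_of: level 1..6 for a key like "h3", else none
def pv_level_of (key : String) : Option Int :=
  if PySem.Str.startswith key "h" then
    match PySem.Int.ofStr? (PySem.Str.slice key (some 1) none) with
    | none => none
    | some level => if 1 ≤ level ∧ level ≤ 6 then some level else none
  else none

-- the final 'for level in (6,5,4,3,2,1): if level in first: return first[level]' loop
def pv_scan (lvs : List Int) (d : PySem.Dict Int String) : Option String :=
  match lvs with
  | [] => none
  | lv :: rest =>
    match d.get? lv with
    | some t => some t
    | none => pv_scan rest d

def pvBStep (d : PySem.Dict Int String) (kv : String × String) : PySem.Dict Int String :=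
  match pv_level_of kv.1 with
  | some level =>
    if PySem.Str.strip kv.2 ≠ "" then d.setdefault level (PySem.Str.strip kv.2) else d
  | none => d

def deepest_heading_text_py_alt (headings : List (String × String)) : Option String :=
  pv_scan [6, 5, 4, 3, 2, 1] (headings.foldl pvBStep PySem.Dict.empty)

-- ===== PRECONDITION & SPEC =====
def Spec_deepest_heading_text_py (headings : List (String × String)) (out : Option String) : Prop := out = deepest_heading_text_py_alt headings
instance (headings : List (String × String)) (out : Option String) : Decidable (Spec_deepest_heading_text_py headings out) := by unfold Spec_deepest_heading_text_py; infer_instance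

-- ===== CLAIM (what is proved, stated in full; the proofs are below) =====
def Claim_equal_deepest_heading_text_py : Prop := ∀ (headings : List (String × String)), Dom_deepest_heading_text_py headings → Spec_deepest_heading_text_py headings (deepest_heading_text_py headings)

-- ===== LEMMAS AND PROOFS =====

-- get? is none at every level above all keys
lemma pv_get_none_of_gt (d : PySem.Dict Int String) (bl j : Int)
    (hk : ∀ k ∈ d.keys, k ≤ bl) (hj : bl < j) : d.get? j = none := by
  rw [PySem.Dict.get?_eq_none_iff_not_mem_keys]
  intro hmem
  exact absurd (hk j hmem) (by omega)

-- inserting a fresh maximal level makes the probe return its text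
lemma pv_scan_insert_max (d : PySem.Dict Int String) (lv : Int) (t : String)
    (h1 : 1 ≤ lv) (h6 : lv ≤ 6) (hnone : ∀ j, lv < j → d.get? j = none) :
    pv_scan [6, 5, 4, 3, 2, 1] (d.insert lv t) = some t := by
  have hup : ∀ j, lv < j → (d.insert lv t).get? j = none := by
    intro j hj
    rw [PySem.Dict.get?_insert_of_ne d t (by omega)]
    exact hnone j hj
  interval_cases lv <;>
    simp [pv_scan, PySem.Dict.get?_insert_self, hup]

-- inserting below a present level does not change the probe
lemma pv_scan_insert_lt (d : PySem.Dict Int String) (lv bl : Int) (t : String)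
    (hlt : lv < bl) (h1 : 1 ≤ bl) (h6 : bl ≤ 6)
    (hbl : (d.get? bl).isSome) (hnone : ∀ j, bl < j → d.get? j = none) :
    pv_scan [6, 5, 4, 3, 2, 1] (d.insert lv t) = pv_scan [6, 5, 4, 3, 2, 1] d := by
  obtain ⟨w, hw⟩ := Option.isSome_iff_exists.mp hbl
  have hup : ∀ j, bl ≤ j → (d.insert lv t).get? j = d.get? j := by
    intro j hj
    exact PySem.Dict.get?_insert_of_ne d t (by omega)
  interval_cases bl <;>
    simp [pv_scan, hup, hnone, hw]

lemma pv_loop_eq : ∀ (hs : List (String × String)) (bl : Int) (bt : Option String)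
    (d : PySem.Dict Int String),
    pv_scan [6, 5, 4, 3, 2, 1] d = bt →
    (∀ k ∈ d.keys, k ≤ bl) →
    (bl ≠ -1 → bl ∈ d.keys ∧ 1 ≤ bl ∧ bl ≤ 6) →
    (hs.foldl pvAStep (bl, bt)).2 = pv_scan [6, 5, 4, 3, 2, 1] (hs.foldl pvBStep d) := by
  intro hs
  induction hs with
  | nil => intro bl bt d hscan _ _; simpa [List.foldl] using hscan.symm
  | cons kv rest ih =>
    intro bl bt d hscan hk hbl
    simp only [List.foldl]
    have hstep : ∃ bl' bt', pvAStep (bl, bt) kv = (bl', bt') ∧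
        pv_scan [6, 5, 4, 3, 2, 1] (pvBStep d kv) = bt' ∧
        (∀ k ∈ (pvBStep d kv).keys, k ≤ bl') ∧
        (bl' ≠ -1 → bl' ∈ (pvBStep d kv).keys ∧ 1 ≤ bl' ∧ bl' ≤ 6) := by
      by_cases hs1 : PySem.Chars.startswith kv.1.toList ['h'] = true
      case neg =>
        have hAeq : pvAStep (bl, bt) kv = (bl, bt) := by simp [pvAStep, hs1]
        have hBeq : pvBStep d kv = d := by simp [pvBStep, pv_level_of, hs1]
        exact ⟨bl, bt, hAeq, by rw [hBeq]; exact hscan, by rw [hBeq]; exact hk, by rw [hBeq]; exact hbl⟩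
      case pos =>
      cases hof : PySem.Int.ofStr? (PySem.Str.slice kv.1 (some 1) none) with
      | none =>
        have hAeq : pvAStep (bl, bt) kv = (bl, bt) := by simp [pvAStep, hs1, hof]
        have hBeq : pvBStep d kv = d := by simp [pvBStep, pv_level_of, hs1, hof]
        exact ⟨bl, bt, hAeq, by rw [hBeq]; exact hscan, by rw [hBeq]; exact hk, by rw [hBeq]; exact hbl⟩
      | some level =>
        by_cases hrange : 1 ≤ level ∧ level ≤ 6
        case neg =>
          have hAeq : pvAStep (bl, bt) kv = (bl, bt) := by
            simp [pvAStep, hs1, hof]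
            intro h1 h6 _; exact absurd ⟨h1, h6⟩ hrange
          have hBeq : pvBStep d kv = d := by simp [pvBStep, pv_level_of, hs1, hof, hrange]
          exact ⟨bl, bt, hAeq, by rw [hBeq]; exact hscan, by rw [hBeq]; exact hk, by rw [hBeq]; exact hbl⟩
        case pos =>
        by_cases hne : PySem.Str.strip kv.2 = ""
        case pos =>
          have hAeq : pvAStep (bl, bt) kv = (bl, bt) := by
            simp [pvAStep, hs1, hof, hne]
          have hBeq : pvBStep d kv = d := by
            simp [pvBStep, pv_level_of, hs1, hof, hrange.1, hrange.2, hne]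
          exact ⟨bl, bt, hAeq, by rw [hBeq]; exact hscan, by rw [hBeq]; exact hk, by rw [hBeq]; exact hbl⟩
        case neg =>
        by_cases hgt : bl < level
        case pos =>
          -- fresh maximal level: setdefault inserts, and the probe finds it
          have hnotmem : level ∉ d.keys := fun hm => absurd (hk level hm) (by omega)
          have hnc : d.contains level = false := by
            rw [← Bool.not_eq_true, PySem.Dict.contains_iff_mem_keys]; exact hnotmem
          have hAeq : pvAStep (bl, bt) kv = (level, some (PySem.Str.strip kv.2)) := by
            simp [pvAStep, hs1, hof, hrange.1, hrange.2, hne, hgt]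
          have hBeq : pvBStep d kv = d.insert level (PySem.Str.strip kv.2) := by
            simp [pvBStep, pv_level_of, hs1, hof, hrange.1, hrange.2, hne,
              PySem.Dict.setdefault_of_not_contains d _ hnc]
          refine ⟨level, some (PySem.Str.strip kv.2), hAeq, ?_, ?_, ?_⟩
          · rw [hBeq]
            exact pv_scan_insert_max d level _ hrange.1 hrange.2
              (fun j hj => pv_get_none_of_gt d bl j hk (by omega))
          · intro k hkm
            rw [hBeq] at hkm
            rcases (PySem.Dict.mem_keys_insert d level k _).mp hkm with h | h
            · omega
            · exact le_of_lt (lt_of_le_of_lt (hk k h) hgt)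
          · intro _
            rw [hBeq]
            exact ⟨(PySem.Dict.mem_keys_insert d level level _).mpr (Or.inl rfl),
              hrange.1, hrange.2⟩
        case neg =>
          -- level ≤ bl: A keeps its state, and the probe still stops at bl first
          have hAeq : pvAStep (bl, bt) kv = (bl, bt) := by
            simp [pvAStep, hs1, hof, hne, hgt]
          have hblfacts := hbl (by omega)
          by_cases hmem : level ∈ d.keys
          case pos =>
            have hBeq : pvBStep d kv = d := by
              simp [pvBStep, pv_level_of, hs1, hof, hrange.1, hrange.2, hne,
                PySem.Dict.setdefault_of_contains d _
                  ((PySem.Dict.contains_iff_mem_keys d level).mpr hmem)]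
            exact ⟨bl, bt, hAeq, by rw [hBeq]; exact hscan, by rw [hBeq]; exact hk, by rw [hBeq]; exact hbl⟩
          case neg =>
            have hnc : d.contains level = false := by
              rw [← Bool.not_eq_true, PySem.Dict.contains_iff_mem_keys]; exact hmem
            have hBeq : pvBStep d kv = d.insert level (PySem.Str.strip kv.2) := by
              simp [pvBStep, pv_level_of, hs1, hof, hrange.1, hrange.2, hne,
                PySem.Dict.setdefault_of_not_contains d _ hnc]
            have hltbl : level < bl := by
              rcases lt_or_eq_of_le (show level ≤ bl by omega) with h | h
              · exact h
              · exact absurd (h ▸ hblfacts.1) hmem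
            have hsome : (d.get? bl).isSome := by
              cases hg : d.get? bl with
              | none =>
                exact absurd ((PySem.Dict.get?_eq_none_iff_not_mem_keys d bl).mp hg) (not_not_intro hblfacts.1)
              | some _ => rfl
            refine ⟨bl, bt, hAeq, ?_, ?_, ?_⟩
            · rw [hBeq, pv_scan_insert_lt d level bl _ hltbl hblfacts.2.1 hblfacts.2.2 hsome
                (fun j hj => pv_get_none_of_gt d bl j hk hj)]
              exact hscan
            · intro k hkm
              rw [hBeq] at hkm
              rcases (PySem.Dict.mem_keys_insert d level k _).mp hkm with h | h
              · omega
              · exact hk k h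
            · intro _
              rw [hBeq]
              exact ⟨(PySem.Dict.mem_keys_insert d level bl _).mpr (Or.inr hblfacts.1),
                hblfacts.2.1, hblfacts.2.2⟩
    obtain ⟨bl', bt', hA, hB, hk', hbl'⟩ := hstep
    rw [hA]
    exact ih bl' bt' (pvBStep d kv) hB hk' hbl'

-- ===== VERDICT (by name: the statement is the Claim_ definition above) =====
theorem deepest_heading_text_py_spec : Claim_equal_deepest_heading_text_py := by
  intro headings _
  unfold Spec_deepest_heading_text_py deepest_heading_text_py deepest_heading_text_py_alt
  exact pv_loop_eq headings (-1) none PySem.Dict.empty (by simp [pv_scan]) (by simp) (by simp)
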